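-- pv_equiv track=rewrite | github.com/elvispy/PESolutions | Problems301-400/PE345.py | update_usable
-- ===== SOURCE A (Python) =====
-- def compare(matrix, c1, c2): #Compare if two cells at positions c1, c2 are comparable
--     history = list()
--     if c1[0] == c2[0]:
--         for i in range(len(matrix)):
--             if i != c1[0]:
--                 condition = (matrix[c1[0]][c1[1]] + matrix[i][c2[1]] > matrix[c2[0]][c2[1]] + matrix[i][c1[1]])
--                 history.append(condition)
--         if all(history) and (len(history) > 0):
--             return True
--         elif (not any(history)) and (len(history) > 0):
--             return False
--         else:
--             return None
--     elif c1[1] == c2[1]: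
--         for i in range(len(matrix)):
--             if i != c1[1]:
--                 condition = (matrix[c1[0]][c1[1]] + matrix[c2[0]][i] > matrix[c2[0]][c2[1]] + matrix[c1[0]][i])
--                 history.append(condition)
--         if all(history) and (len(history) > 0):
--             return True
--         elif not any(history) and (len(history) > 0):
--             return False
--         else:
--             return None
--     else:
--         raise Exception("THey should share at least one row or column!")
--
-- def update_usable(matrix, usable):
--     #We put false whenever we know we cant use an element.
--     sz = len(matrix)
--
--     for i in range(sz):
--         for j in range(sz):
--             if usable[i][j]:
--                 for k in range(sz):
--                     if k != i and usable[k][j]: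
--                         res = compare(matrix, (i, j), (k, j))
--                         if res != None:
--                             if res == False:
--                                 usable[i][j] = False
--                             elif res == True:
--                                 usable[k][j] = False
--
--                     if k != j and usable[i][k]:
--                         res = compare(matrix, (i, j), (i, k))
--                         if res != None:
--                             if res == False:
--                                 usable[i][j] = False
--                             elif res == True:
--                                 usable[i][k] = False
--
--     return usable
-- ===== SOURCE B (Python) =====
-- # Faster re-implementation: precompute per row-pair / column-pair difference stats
-- # (max, whether the max is unique, min) once in O(n) each, so every comparability
-- # test in the main sweep is an O(1) lookup: O(n^3) total vs A's O(n^4).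
-- # Like the original, mutates `usable` in place and returns it.
--
-- def _stats(d):
--     mx = max(d)
--     mn = min(d)
--     return (mx, d.count(mx) == 1, mn)
--
-- def _verdict(stats, v):
--     mx, unique_mx, mn = stats
--     if v == mx and unique_mx:
--         return True
--     if v == mn:
--         return False
--     return None
--
-- def update_usable(matrix, usable):
--     sz = len(matrix)
--     # row_stats[i][k]: stats of d[c] = matrix[i][c] - matrix[k][c] over all columns c
--     row_stats = [[_stats([matrix[i][c] - matrix[k][c] for c in range(sz)])
--                   for k in range(sz)] for i in range(sz)]
--     # col_stats[j][k]: stats of e[r] = matrix[r][j] - matrix[r][k] over all rows r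
--     col_stats = [[_stats([matrix[r][j] - matrix[r][k] for r in range(sz)])
--                   for k in range(sz)] for j in range(sz)]
--
--     for i in range(sz):
--         for j in range(sz):
--             if usable[i][j]:
--                 for k in range(sz):
--                     if k != i and usable[k][j]:
--                         res = _verdict(row_stats[i][k], matrix[i][j] - matrix[k][j])
--                         if res is False:
--                             usable[i][j] = False
--                         elif res is True:
--                             usable[k][j] = False
--                     if k != j and usable[i][k]:
--                         res = _verdict(col_stats[j][k], matrix[i][j] - matrix[i][k])
--                         if res is False:
--                             usable[i][j] = False
--                         elif res is True:
--                             usable[i][k] = False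
--     return usable
-- ===== Notes on version B (the rewrite author's own statement) =====
-- stated objective: faster
-- what changed: Instead of rebuilding an O(n) comparison history for every cell pair (A's inner compare loop, O(n^4) total), B precomputes for each row pair and column pair the difference-vector max, uniqueness of the max, and min once (O(n^3)), and each comparability verdict becomes an O(1) table lookup in the same sweep order.
-- outside the precondition, e.g. on update_usable([[]], [[False]]): A returns [[False]], B raises IndexError
import Mathlib
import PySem

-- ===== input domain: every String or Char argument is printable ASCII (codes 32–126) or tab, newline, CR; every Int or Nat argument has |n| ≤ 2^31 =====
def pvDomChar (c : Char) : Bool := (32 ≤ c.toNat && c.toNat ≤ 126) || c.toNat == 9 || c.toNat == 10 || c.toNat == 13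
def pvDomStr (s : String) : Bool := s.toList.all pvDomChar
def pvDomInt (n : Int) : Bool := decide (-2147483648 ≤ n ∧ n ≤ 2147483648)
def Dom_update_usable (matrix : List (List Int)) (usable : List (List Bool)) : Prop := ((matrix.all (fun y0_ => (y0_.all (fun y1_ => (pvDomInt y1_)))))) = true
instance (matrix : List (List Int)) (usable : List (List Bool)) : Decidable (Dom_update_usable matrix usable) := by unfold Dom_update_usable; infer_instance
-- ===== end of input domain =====

-- B replaces A's O(n) per-pair comparison history by O(1) lookups in per-row-pair/column-pair
-- stat tables precomputed once (objective: faster, O(n^3) vs O(n^4)).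
-- Both Pythons mutate `usable` in place and return it; the equivalence is about the return value.

-- ===== PORT A =====
-- m[r][c] / u[r][c] / u[r][c] = v for range-loop indices r, c; in range under Pre_update_usable
-- (equals PySem.List.pyGetD/pySetD at a Nat cast index, via pyGetD_natCast/pySetD_natCast)
def pvMget (m : List (List Int)) (r c : Nat) : Int := (m.getD r []).getD c 0
def pvUget (u : List (List Bool)) (r c : Nat) : Bool := (u.getD r []).getD c false
def pvUset (u : List (List Bool)) (r c : Nat) (v : Bool) : List (List Bool) :=
  u.set r ((u.getD r []).set c v)

-- compare(matrix, c1, c2); the final `else none` is Python's `raise` branch, never reached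
-- from update_usable (the two cells always share a coordinate there)
def pvCompare (matrix : List (List Int)) (c1 c2 : Nat × Nat) : Option Bool :=
  if c1.1 = c2.1 then
    let history := (List.range matrix.length).foldl (fun h i =>
      if i ≠ c1.1 then
        h ++ [decide (pvMget matrix c1.1 c1.2 + pvMget matrix i c2.2
              > pvMget matrix c2.1 c2.2 + pvMget matrix i c1.2)]
      else h) []
    if history.all id ∧ 0 < history.length then some true
    else if history.any id = false ∧ 0 < history.length then some false
    else none
  else if c1.2 = c2.2 then
    let history := (List.range matrix.length).foldl (fun h i =>
      if i ≠ c1.2 then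
        h ++ [decide (pvMget matrix c1.1 c1.2 + pvMget matrix c2.1 i
              > pvMget matrix c2.1 c2.2 + pvMget matrix c1.1 i)]
      else h) []
    if history.all id ∧ 0 < history.length then some true
    else if history.any id = false ∧ 0 < history.length then some false
    else none
  else none

-- body of A's innermost `for k in range(sz)` loop
def pvStepA (matrix : List (List Int)) (i j : Nat) (u : List (List Bool)) (k : Nat) :
    List (List Bool) :=
  let u1 := if k ≠ i ∧ pvUget u k j then
      match pvCompare matrix (i, j) (k, j) with
      | some false => pvUset u i j false
      | some true => pvUset u k j false
      | none => u
    else u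
  if k ≠ j ∧ pvUget u1 i k then
      match pvCompare matrix (i, j) (i, k) with
      | some false => pvUset u1 i j false
      | some true => pvUset u1 i k false
      | none => u1
  else u1

def update_usable (matrix : List (List Int)) (usable : List (List Bool)) : List (List Bool) :=
  let sz := matrix.length
  (List.range sz).foldl (fun u i =>
    (List.range sz).foldl (fun u j =>
      if pvUget u i j then (List.range sz).foldl (pvStepA matrix i j) u else u) u) usable

-- ===== PORT B =====
-- _stats(d): (max(d), d.count(max(d)) == 1, min(d)); d is nonempty at every call site
def pvStats (d : List Int) : Int × Bool × Int :=
  let mx := (PySem.List.max? d (fun x => x)).getD 0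
  let mn := (PySem.List.min? d (fun x => x)).getD 0
  (mx, d.count mx == 1, mn)

-- _verdict(stats, v)
def pvVerdict (s : Int × Bool × Int) (v : Int) : Option Bool :=
  if v == s.1 && s.2.1 then some true
  else if v == s.2.2 then some false
  else none

def pvRowDiff (matrix : List (List Int)) (i k : Nat) : List Int :=
  (List.range matrix.length).map (fun c => pvMget matrix i c - pvMget matrix k c)

def pvColDiff (matrix : List (List Int)) (j k : Nat) : List Int :=
  (List.range matrix.length).map (fun r => pvMget matrix r j - pvMget matrix r k)

-- body of B's innermost `for k in range(sz)` loop (O(1) table lookups)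
def pvStepB (matrix : List (List Int)) (rowStats colStats : List (List (Int × Bool × Int)))
    (i j : Nat) (u : List (List Bool)) (k : Nat) : List (List Bool) :=
  let u1 := if k ≠ i ∧ pvUget u k j then
      match pvVerdict ((rowStats.getD i []).getD k (0, false, 0))
              (pvMget matrix i j - pvMget matrix k j) with
      | some false => pvUset u i j false
      | some true => pvUset u k j false
      | none => u
    else u
  if k ≠ j ∧ pvUget u1 i k then
      match pvVerdict ((colStats.getD j []).getD k (0, false, 0))
              (pvMget matrix i j - pvMget matrix i k) with
      | some false => pvUset u1 i j false
      | some true => pvUset u1 i k false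
      | none => u1
  else u1

def update_usable_alt (matrix : List (List Int)) (usable : List (List Bool)) :
    List (List Bool) :=
  let sz := matrix.length
  let rowStats := (List.range sz).map (fun i =>
    (List.range sz).map (fun k => pvStats (pvRowDiff matrix i k)))
  let colStats := (List.range sz).map (fun j =>
    (List.range sz).map (fun k => pvStats (pvColDiff matrix j k)))
  (List.range sz).foldl (fun u i =>
    (List.range sz).foldl (fun u j =>
      if pvUget u i j then
        (List.range sz).foldl (pvStepB matrix rowStats colStats i j) u
      else u) u) usable

-- ===== PRECONDITION & SPEC =====
-- Pre_ excludes ragged inputs (a matrix row, one of the first len(matrix) usable rows, or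
-- usable itself shorter than len(matrix)): there indexing raises IndexError — A can still
-- return on a ragged matrix when `usable` disables every comparison, but B's precompute
-- always indexes every matrix entry and raises (see cites in claim.json).
def Pre_update_usable (matrix : List (List Int)) (usable : List (List Bool)) : Prop :=
  (∀ row ∈ matrix, matrix.length ≤ row.length) ∧
  matrix.length ≤ usable.length ∧
  (∀ row ∈ usable.take matrix.length, matrix.length ≤ row.length)

instance (matrix : List (List Int)) (usable : List (List Bool)) :
    Decidable (Pre_update_usable matrix usable) := by unfold Pre_update_usable; infer_instance

def pvWitness_update_usable : List (List Int) × List (List Bool) :=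
  ([[1, 2], [3, 4]], [[true, true], [true, false]])

def Spec_update_usable (matrix : List (List Int)) (usable : List (List Bool))
    (out : List (List Bool)) : Prop := out = update_usable_alt matrix usable

instance (matrix : List (List Int)) (usable : List (List Bool)) (out : List (List Bool)) :
    Decidable (Spec_update_usable matrix usable out) := by
  unfold Spec_update_usable; infer_instance

-- ===== CLAIM (what is proved, stated in full; the proofs are below) =====
def Claim_equal_update_usable : Prop := ∀ (matrix : List (List Int)) (usable : List (List Bool)), Dom_update_usable matrix usable → Pre_update_usable matrix usable → Spec_update_usable matrix usable (update_usable matrix usable)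

-- ===== LEMMAS AND PROOFS =====

theorem pv_two_le {α : Type} {l : List α} {a b : α} (ha : a ∈ l) (hb : b ∈ l)
    (hab : a ≠ b) : 2 ≤ l.length := by
  match l with
  | [] => cases ha
  | [x] =>
    exact absurd ((List.mem_singleton.mp ha).trans (List.mem_singleton.mp hb).symm) hab
  | x :: y :: t => simp [List.length]

-- the history list A's compare builds, for skip index `skip` over the diff profile f
def pvHist (f : Nat → Int) (sz skip : Nat) : List Bool :=
  ((List.range sz).filter (fun r => r ≠ skip)).map (fun r => decide (f skip > f r))

theorem pv_count_eq_one (f : Nat → Int) (sz skip : Nat) (hs : skip < sz)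
    (h : ∀ r < sz, r ≠ skip → f r < f skip) :
    ((List.range sz).map f).count (f skip) = 1 := by
  have h1 : ((List.range sz).map f).count (f skip)
      = (List.range sz).countP (fun r => f r == f skip) := by
    show List.countP _ _ = _
    rw [List.countP_map]; rfl
  rw [h1, List.countP_congr (q := fun r => r == skip) ?_]
  · show (List.range sz).count skip = 1
    have h2 := List.nodup_iff_count_le_one.mp (List.nodup_range (n := sz)) skip
    have h3 := List.count_pos_iff.mpr (List.mem_range.mpr hs)
    omega
  · intro r hr
    rw [List.mem_range] at hr
    by_cases hrs : r = skip
    · simp [hrs]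
    · have := h r hr hrs
      simp [hrs]
      omega

theorem pv_count_two (f : Nat → Int) (sz skip r : Nat) (hs : skip < sz) (hr : r < sz)
    (hne : r ≠ skip) (hv : f r = f skip) :
    2 ≤ ((List.range sz).map f).count (f skip) := by
  have h1 : ((List.range sz).map f).count (f skip)
      = ((List.range sz).filter (fun r => f r == f skip)).length := by
    show List.countP _ _ = _
    rw [List.countP_map, List.countP_eq_length_filter]; rfl
  rw [h1]
  refine pv_two_le (a := skip) (b := r) ?_ ?_ (Ne.symm hne)
  · rw [List.mem_filter, List.mem_range]; simp [hs]
  · rw [List.mem_filter, List.mem_range]; simp [hr, hv]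

-- A's all/any verdict on the history equals B's max/uniqueness/min verdict
theorem pv_core (f : Nat → Int) (sz skip : Nat) (hs : skip < sz) (h2 : 2 ≤ sz) :
    (if (pvHist f sz skip).all id ∧ 0 < (pvHist f sz skip).length then some true
     else if (pvHist f sz skip).any id = false ∧ 0 < (pvHist f sz skip).length then some false
     else none) = pvVerdict (pvStats ((List.range sz).map f)) (f skip) := by
  set d := (List.range sz).map f with hd
  have hvmem : f skip ∈ d := List.mem_map.mpr ⟨skip, List.mem_range.mpr hs, rfl⟩
  have hdne : d ≠ [] := List.ne_nil_of_mem hvmem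
  obtain ⟨mx, hmx⟩ : ∃ m, PySem.List.max? d (fun x => x) = some m := by
    cases hm : PySem.List.max? d (fun x => x) with
    | none => exact absurd ((PySem.List.max?_eq_none_iff d (fun x => x)).mp hm) hdne
    | some m => exact ⟨m, rfl⟩
  obtain ⟨mn, hmn⟩ : ∃ m, PySem.List.min? d (fun x => x) = some m := by
    cases hm : PySem.List.min? d (fun x => x) with
    | none => exact absurd ((PySem.List.min?_eq_none_iff d (fun x => x)).mp hm) hdne
    | some m => exact ⟨m, rfl⟩
  have hmxmem : mx ∈ d := PySem.List.max?_mem hmx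
  have hmxmax : ∀ y ∈ d, y ≤ mx := PySem.List.max?_isMax hmx
  have hmnmem : mn ∈ d := PySem.List.min?_mem hmn
  have hmnmin : ∀ y ∈ d, mn ≤ y := PySem.List.min?_isMin hmn
  have hall : (pvHist f sz skip).all id = true ↔ ∀ r < sz, r ≠ skip → f r < f skip := by
    simp only [pvHist, List.all_eq_true, List.mem_map, List.mem_filter, List.mem_range, id,
      decide_eq_true_eq, forall_exists_index, and_imp]
    constructor
    · intro h r hr hrs
      simpa using h (decide (f skip > f r)) r hr (by simpa using hrs) rfl
    · rintro h b r hr hrs rfl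
      simpa using h r hr (by simpa using hrs)
  have hany : (pvHist f sz skip).any id = false ↔ ∀ r < sz, r ≠ skip → f skip ≤ f r := by
    simp only [pvHist, List.any_eq_false, List.mem_map, List.mem_filter, List.mem_range, id,
      forall_exists_index, and_imp]
    constructor
    · intro h r hr hrs
      have := h (decide (f skip > f r)) r hr (by simpa using hrs) rfl
      simpa [not_lt] using this
    · rintro h b r hr hrs rfl
      simpa [not_lt] using h r hr (by simpa using hrs)
  have hlen : 0 < (pvHist f sz skip).length := by
    have hr : (if skip = 0 then 1 else 0) ∈ (List.range sz).filter (fun r => r ≠ skip) := by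
      rw [List.mem_filter, List.mem_range]
      split_ifs with h <;> simp [h] <;> omega
    unfold pvHist
    rw [List.length_map]
    exact List.length_pos_of_ne_nil (List.ne_nil_of_mem hr)
  have hP : (∀ r < sz, r ≠ skip → f r < f skip) ↔ (f skip = mx ∧ d.count mx = 1) := by
    constructor
    · intro h
      have hvmax : f skip = mx := by
        have h1 : mx ≤ f skip := by
          obtain ⟨r, hr, hfr⟩ := List.mem_map.mp hmxmem
          rw [List.mem_range] at hr
          by_cases hrs : r = skip
          · subst hrs; omega
          · have := h r hr hrs; omega
        have h2 := hmxmax _ hvmem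
        omega
      refine ⟨hvmax, ?_⟩
      rw [← hvmax, hd]
      exact pv_count_eq_one f sz skip hs h
    · rintro ⟨hv, hc⟩ r hr hrs
      have h1 : f r ≤ f skip := by
        have := hmxmax (f r) (List.mem_map.mpr ⟨r, List.mem_range.mpr hr, rfl⟩); omega
      rcases lt_or_eq_of_le h1 with h | h
      · exact h
      · exfalso
        have := pv_count_two f sz skip r hs hr hrs h
        rw [hv, ← hd] at this
        omega
  have hQ : (∀ r < sz, r ≠ skip → f skip ≤ f r) ↔ f skip = mn := by
    constructor
    · intro h
      have h1 : f skip ≤ mn := by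
        obtain ⟨r, hr, hfr⟩ := List.mem_map.mp hmnmem
        rw [List.mem_range] at hr
        by_cases hrs : r = skip
        · subst hrs; omega
        · have := h r hr hrs; omega
      have h2 := hmnmin _ hvmem
      omega
    · intro h r hr hrs
      have := hmnmin (f r) (List.mem_map.mpr ⟨r, List.mem_range.mpr hr, rfl⟩)
      omega
  simp only [pvVerdict, pvStats, hmx, hmn, Option.getD_some]
  by_cases hp : ∀ r < sz, r ≠ skip → f r < f skip
  · obtain ⟨hv, hc⟩ := hP.mp hp
    rw [if_pos ⟨hall.mpr hp, hlen⟩, if_pos]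
    simp [hv, hc]
  · have hcond : ¬ ((f skip == mx && (d.count mx == 1)) = true) := by
      simp only [Bool.and_eq_true, beq_iff_eq]
      intro ⟨h1, h2⟩
      exact hp (hP.mpr ⟨h1, h2⟩)
    rw [if_neg (by rw [hall]; tauto), if_neg hcond]
    by_cases hq : ∀ r < sz, r ≠ skip → f skip ≤ f r
    · rw [if_pos ⟨hany.mpr hq, hlen⟩, if_pos (by simp [hQ.mp hq])]
    · rw [if_neg (by rw [hany]; tauto), if_neg (by simp; intro h; exact hq (hQ.mpr h))]

theorem pv_compare_col (matrix : List (List Int)) (i j k : Nat)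
    (hi : i < matrix.length) (hk : k < matrix.length) (hj : j < matrix.length)
    (hik : i ≠ k) :
    pvCompare matrix (i, j) (k, j)
      = pvVerdict (pvStats (pvRowDiff matrix i k)) (pvMget matrix i j - pvMget matrix k j) := by
  have h2 : 2 ≤ matrix.length := by omega
  simp only [pvCompare]
  rw [if_neg hik, if_pos trivial, PySem.List.foldl_append_ite, List.nil_append]
  have hh : ((List.range matrix.length).filter (fun r => r ≠ j)).map
        (fun r => decide (pvMget matrix i j + pvMget matrix k r
          > pvMget matrix k j + pvMget matrix i r))
      = pvHist (fun c => pvMget matrix i c - pvMget matrix k c) matrix.length j := by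
    unfold pvHist
    refine List.map_congr_left ?_
    intro r _
    rw [decide_eq_decide]
    beta_reduce
    omega
  rw [hh]
  exact pv_core (fun c => pvMget matrix i c - pvMget matrix k c) matrix.length j hj h2

theorem pv_compare_row (matrix : List (List Int)) (i j k : Nat)
    (hi : i < matrix.length) (hj : j < matrix.length) (hk : k < matrix.length)
    (hjk : j ≠ k) :
    pvCompare matrix (i, j) (i, k)
      = pvVerdict (pvStats (pvColDiff matrix j k)) (pvMget matrix i j - pvMget matrix i k) := by
  have h2 : 2 ≤ matrix.length := by omega
  simp only [pvCompare]
  rw [if_pos trivial, PySem.List.foldl_append_ite, List.nil_append]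
  have hh : ((List.range matrix.length).filter (fun r => r ≠ i)).map
        (fun r => decide (pvMget matrix i j + pvMget matrix r k
          > pvMget matrix i k + pvMget matrix r j))
      = pvHist (fun r => pvMget matrix r j - pvMget matrix r k) matrix.length i := by
    unfold pvHist
    refine List.map_congr_left ?_
    intro r _
    rw [decide_eq_decide]
    beta_reduce
    omega
  rw [hh]
  exact pv_core (fun r => pvMget matrix r j - pvMget matrix r k) matrix.length i hi h2


theorem pv_step_eq (matrix : List (List Int)) (i j k : Nat)
    (hi : i < matrix.length) (hj : j < matrix.length) (hk : k < matrix.length)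
    (u : List (List Bool)) :
    pvStepA matrix i j u k
      = pvStepB matrix
          ((List.range matrix.length).map (fun i =>
            (List.range matrix.length).map (fun k => pvStats (pvRowDiff matrix i k))))
          ((List.range matrix.length).map (fun j =>
            (List.range matrix.length).map (fun k => pvStats (pvColDiff matrix j k))))
          i j u k := by
  have hrs : ((((List.range matrix.length).map (fun i =>
        (List.range matrix.length).map (fun k => pvStats (pvRowDiff matrix i k)))).getD i []).getD
        k (0, false, 0)) = pvStats (pvRowDiff matrix i k) := by
    rw [PySem.List.getD_map_range _ _ _ _ hi, PySem.List.getD_map_range _ _ _ _ hk]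
  have hcs : ((((List.range matrix.length).map (fun j =>
        (List.range matrix.length).map (fun k => pvStats (pvColDiff matrix j k)))).getD j []).getD
        k (0, false, 0)) = pvStats (pvColDiff matrix j k) := by
    rw [PySem.List.getD_map_range _ _ _ _ hj, PySem.List.getD_map_range _ _ _ _ hk]
  simp only [pvStepA, pvStepB, hrs, hcs]
  have h1 : (if k ≠ i ∧ pvUget u k j then
        match pvCompare matrix (i, j) (k, j) with
        | some false => pvUset u i j false
        | some true => pvUset u k j false
        | none => u
      else u)
      = (if k ≠ i ∧ pvUget u k j then
        match pvVerdict (pvStats (pvRowDiff matrix i k))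
            (pvMget matrix i j - pvMget matrix k j) with
        | some false => pvUset u i j false
        | some true => pvUset u k j false
        | none => u
      else u) := by
    by_cases hki : k = i
    · simp [hki]
    · rw [pv_compare_col matrix i j k hi hk hj (Ne.symm hki)]
  rw [h1]
  by_cases hkj : k = j
  · simp [hkj]
  · rw [pv_compare_row matrix i j k hi hj hk (Ne.symm hkj)]


-- ===== VERDICT (by name: the statement is the Claim_ definition above) =====
theorem update_usable_spec : Claim_equal_update_usable := by
  intro matrix usable _dom _pre
  simp only [Spec_update_usable, update_usable, update_usable_alt]
  refine PySem.List.foldl_congr_mem' _ _ _ _ ?_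
  intro i hi u
  refine PySem.List.foldl_congr_mem' _ _ _ _ ?_
  intro j hj u
  rw [List.mem_range] at *
  by_cases hu : pvUget u i j
  · simp only [hu, if_true]
    refine PySem.List.foldl_congr_mem' _ _ _ _ ?_
    intro k hk u
    rw [List.mem_range] at hk
    exact pv_step_eq matrix i j k hi hj hk u
  · simp [hu]
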